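-- pv_equiv track=rewrite | github.com/GxBrasilNOficial/GeneXus-XPZ-Skills | scripts/New-KbIntelligenceIndex.py | case_insensitive_lookup
-- ===== SOURCE A (Python) =====
-- def case_insensitive_lookup(names: set[str], object_type: str) -> dict[str, str]:
--     grouped: dict[str, list[str]] = {}
--     for name in names:
--         grouped.setdefault(name.lower(), []).append(name)
--     collisions = {key: sorted(values) for key, values in grouped.items() if len(values) > 1}
--     if collisions:
--         details = "; ".join(f"{key}: {', '.join(values)}" for key, values in sorted(collisions.items()))
--         raise ValueError(f"Ambiguous {object_type} names differing only by case: {details}")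
--     return {key: values[0] for key, values in grouped.items()}
-- ===== SOURCE B (Python) =====
-- def case_insensitive_lookup(names: set[str], object_type: str) -> dict[str, str]:
--     result: dict[str, str] = {}
--     collided: set[str] = set()
--     for name in names:
--         key = name.lower()
--         if key in result or key in collided:
--             collided.add(key)
--         else:
--             result[key] = name
--     if collided:
--         details = "; ".join(
--             f"{key}: {', '.join(sorted(n for n in names if n.lower() == key))}"
--             for key in sorted(collided)
--         )
--         raise ValueError(f"Ambiguous {object_type} names differing only by case: {details}")
--     return result
-- ===== Notes on version B (the rewrite author's own statement) =====
-- stated objective: simpler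
-- what changed: B replaces A's dict-of-member-lists plus two dict comprehensions by a single pass that builds the final lowercase->name dict directly and records colliding keys in a set, recomputing member lists only in the error path.
import Mathlib
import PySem

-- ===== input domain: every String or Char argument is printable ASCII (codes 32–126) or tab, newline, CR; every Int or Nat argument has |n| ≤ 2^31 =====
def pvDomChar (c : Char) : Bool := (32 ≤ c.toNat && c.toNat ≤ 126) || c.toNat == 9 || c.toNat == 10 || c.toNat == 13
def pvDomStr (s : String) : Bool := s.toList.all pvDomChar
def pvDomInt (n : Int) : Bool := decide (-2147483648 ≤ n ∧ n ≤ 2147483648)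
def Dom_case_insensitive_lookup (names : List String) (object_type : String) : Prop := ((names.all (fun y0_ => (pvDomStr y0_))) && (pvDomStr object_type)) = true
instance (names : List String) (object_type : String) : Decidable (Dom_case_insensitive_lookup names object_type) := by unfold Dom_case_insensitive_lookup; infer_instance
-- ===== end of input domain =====

-- B builds the lowercase->name dict in one pass with a collision set instead of A's dict of
-- member lists plus two comprehensions (objective: simpler). Equivalence is about the return
-- value; on case collisions both raise the identical ValueError (outside Pre_).

-- ===== PORT A =====
def case_insensitive_lookup (names : List String) (object_type : String) : List (String × String) :=
  -- grouped.setdefault(name.lower(), []).append(name)  ==  insert of (old value or []) ++ [name],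
  -- overwrite keeping position — exact for Python's in-place list append after setdefault
  let grouped : PySem.Dict String (List String) :=
    names.foldl (fun d name =>
      let k := PySem.Str.lower name
      d.insert k (d.getD k [] ++ [name])) PySem.Dict.empty
  let collisions : List (String × List String) :=
    (grouped.items.filter (fun kv => kv.2.length > 1)).map
      (fun kv => (kv.1, PySem.List.sorted kv.2 (fun x => x) false))
  if collisions.isEmpty then
    grouped.items.map (fun kv => (kv.1, kv.2.headD ""))  -- values[0]; groups are nonempty by construction
  else [] -- raise ValueError: excluded by Pre_

-- ===== PORT B =====
def case_insensitive_lookup_alt (names : List String) (object_type : String) : List (String × String) :=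
  let st : PySem.Dict String String × PySem.Set String :=
    names.foldl (fun st name =>
      let k := PySem.Str.lower name
      if st.1.contains k || st.2.contains k then (st.1, st.2.add k)
      else (st.1.insert k name, st.2)) (PySem.Dict.empty, PySem.Set.ofList [])
  if st.2.isEmpty then st.1.items
  else [] -- raise ValueError: excluded by Pre_

-- ===== PRECONDITION & SPEC =====
-- Pre_ excludes exactly the inputs on which A raises ValueError: a case collision, i.e. two
-- distinct lowered names equal (names encodes a Python set, so its elements are distinct).
def Pre_case_insensitive_lookup (names : List String) (object_type : String) : Prop :=
  (names.map PySem.Str.lower).Nodup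
instance (names : List String) (object_type : String) : Decidable (Pre_case_insensitive_lookup names object_type) := by unfold Pre_case_insensitive_lookup; infer_instance
def pvWitness_case_insensitive_lookup : List String × String := (["Ant", "bee", "Cat"], "object")

def Spec_case_insensitive_lookup (names : List String) (object_type : String) (out : List (String × String)) : Prop := out = case_insensitive_lookup_alt names object_type
instance (names : List String) (object_type : String) (out : List (String × String)) : Decidable (Spec_case_insensitive_lookup names object_type out) := by unfold Spec_case_insensitive_lookup; infer_instance

-- ===== CLAIM (what is proved, stated in full; the proofs are below) =====
def Claim_equal_case_insensitive_lookup : Prop := ∀ (names : List String) (object_type : String), Dom_case_insensitive_lookup names object_type → Pre_case_insensitive_lookup names object_type → Spec_case_insensitive_lookup names object_type (case_insensitive_lookup names object_type)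

-- ===== LEMMAS AND PROOFS =====

-- A's grouping loop over fresh, pairwise-distinct lowered keys appends singleton groups.
lemma groupedA_items (names : List String) (d : PySem.Dict String (List String))
    (hnd : d.keys.Nodup)
    (hfresh : ∀ n ∈ names, d.contains (PySem.Str.lower n) = false)
    (hkeys : (names.map PySem.Str.lower).Nodup) :
    (names.foldl (fun d name =>
        d.insert (PySem.Str.lower name) (d.getD (PySem.Str.lower name) [] ++ [name])) d).items
      = d.items ++ names.map (fun n => (PySem.Str.lower n, [n])) := by
  induction names generalizing d with
  | nil => simp
  | cons n ns ih =>
    simp only [List.foldl_cons, List.map, List.nodup_cons] at *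
    have hcn : d.contains (PySem.Str.lower n) = false := hfresh n (by simp)
    have hget : d.getD (PySem.Str.lower n) [] = [] := PySem.Dict.getD_of_not_contains _ _ hcn
    rw [hget]
    rw [ih _ (PySem.Dict.nodup_keys_insert _ _ _ hnd)
        (by
          intro m hm
          rw [PySem.Dict.contains_insert]
          have hne : PySem.Str.lower m ≠ PySem.Str.lower n := by
            intro he; exact hkeys.1 (he ▸ (List.mem_map_of_mem hm))
          simp [hne, hfresh m (List.mem_cons_of_mem _ hm)])
        hkeys.2]
    rw [PySem.Dict.items_insert_of_not_contains _ _ hcn]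
    simp

-- B's loop over fresh, pairwise-distinct lowered keys never collides: the set stays empty and
-- the dict collects (lower n, n) in order.
lemma foldB_state (names : List String) (d : PySem.Dict String String)
    (hnd : d.keys.Nodup)
    (hfresh : ∀ n ∈ names, d.contains (PySem.Str.lower n) = false)
    (hkeys : (names.map PySem.Str.lower).Nodup) :
    (names.foldl (fun st name =>
        let k := PySem.Str.lower name
        if st.1.contains k || st.2.contains k then (st.1, st.2.add k)
        else (st.1.insert k name, st.2)) ((d, PySem.Set.ofList []) : PySem.Dict String String × PySem.Set String))
      = (PySem.Dict.mk (d.items ++ names.map (fun n => (PySem.Str.lower n, n))), PySem.Set.ofList []) := by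
  induction names generalizing d with
  | nil => simp
  | cons n ns ih =>
    simp only [List.foldl_cons, List.map_cons, List.nodup_cons] at *
    have hcn : d.contains (PySem.Str.lower n) = false := hfresh n (by simp)
    have hsn : (PySem.Set.ofList ([] : List String)).contains (PySem.Str.lower n) = false := by
      simp [PySem.Set.ofList]
    rw [show (if d.contains (PySem.Str.lower n) || (PySem.Set.ofList ([] : List String)).contains (PySem.Str.lower n)
          then (d, (PySem.Set.ofList ([] : List String)).add (PySem.Str.lower n))
          else (d.insert (PySem.Str.lower n) n, PySem.Set.ofList []))
        = (d.insert (PySem.Str.lower n) n, PySem.Set.ofList []) by simp [hcn]]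
    rw [ih _ (PySem.Dict.nodup_keys_insert _ _ _ hnd)
        (by
          intro m hm
          rw [PySem.Dict.contains_insert]
          have hne : PySem.Str.lower m ≠ PySem.Str.lower n := by
            intro he; exact hkeys.1 (he ▸ (List.mem_map_of_mem hm))
          simp [hne, hfresh m (List.mem_cons_of_mem _ hm)])
        hkeys.2]
    rw [PySem.Dict.items_insert_of_not_contains _ _ hcn]
    simp

-- ===== VERDICT (by name: the statement is the Claim_ definition above) =====
theorem case_insensitive_lookup_spec : Claim_equal_case_insensitive_lookup := by
  intro names object_type _hdom hpre
  unfold Spec_case_insensitive_lookup case_insensitive_lookup case_insensitive_lookup_alt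
  have hA := groupedA_items names PySem.Dict.empty (by simp) (by simp) hpre
  have hB := foldB_state names PySem.Dict.empty (by simp) (by simp) hpre
  simp only [] at hA hB ⊢
  rw [hA, hB]
  simp [PySem.Dict.empty, PySem.Set.ofList, List.filter_map, Function.comp, List.map_map]
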